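-- pv_equiv track=rewrite | github.com/paul-heyse/CodeAnatomy | tools/cq/query/router.py | _contains_empty_query_assignment
-- ===== SOURCE A (Python) =====
-- def _contains_empty_query_assignment(query_string: str) -> bool:
--     for token in query_string.split():
--         key, sep, value = token.partition("=")
--         if not sep or not key:
--             continue
--         if not value:
--             return True
--     return False
-- ===== SOURCE B (Python) =====
-- def _contains_empty_query_assignment(query_string: str) -> bool:
--     # One left-to-right character scan (no split/partition):
--     # state 0 = at token start, 1 = reading a key (no '=' seen),
--     # state 2 = nonempty key followed by '=' with nothing after it yet,
--     # state 3 = rest of this token cannot match.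
--     state = 0
--     for ch in query_string:
--         if ch.isspace():
--             if state == 2:
--                 return True
--             state = 0
--         elif ch == "=":
--             state = 2 if state == 1 else 3
--         else:
--             state = 1 if state <= 1 else 3
--     return state == 2
-- ===== Notes on version B (the rewrite author's own statement) =====
-- stated objective: alternative
-- what changed: Replaces the split()/partition() token loop with a single left-to-right character scan driven by a 4-state machine that detects a nonempty '='-free key whose '=' is the token's last character.
import Mathlib
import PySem

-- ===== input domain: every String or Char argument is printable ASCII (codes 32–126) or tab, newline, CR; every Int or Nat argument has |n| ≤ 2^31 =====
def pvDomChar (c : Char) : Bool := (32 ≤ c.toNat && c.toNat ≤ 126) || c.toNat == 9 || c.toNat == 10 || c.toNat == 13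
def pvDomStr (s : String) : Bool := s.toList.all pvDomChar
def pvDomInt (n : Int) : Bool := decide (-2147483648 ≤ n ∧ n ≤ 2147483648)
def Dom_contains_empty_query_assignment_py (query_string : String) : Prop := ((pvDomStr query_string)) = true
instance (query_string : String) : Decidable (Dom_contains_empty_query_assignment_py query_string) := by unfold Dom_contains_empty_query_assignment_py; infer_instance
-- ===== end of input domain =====

-- B replaces A's split()/partition() token loop by a single character scan with a
-- 4-state machine; same result, no intermediate token lists (objective: alternative).


-- ===== PORT A =====
-- token.partition("="): split at the FIRST '='; `acc` holds the key read so far, reversed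
def pyPartitionEq (acc : List Char) : List Char → List Char × List Char × List Char
  | [] => (acc.reverse, [], [])
  | c :: rest => if c = '=' then (acc.reverse, ['='], rest) else pyPartitionEq (c :: acc) rest

-- A's `for token in query_string.split(): …` loop with continue / early return True
def containsGoA : List (List Char) → Bool
  | [] => false
  | t :: ts =>
    let p := pyPartitionEq [] t
    if p.2.1.isEmpty || p.1.isEmpty then containsGoA ts
    else if p.2.2.isEmpty then true
    else containsGoA ts

def contains_empty_query_assignment_py (query_string : String) : Bool :=
  containsGoA (PySem.Chars.split₀ query_string.toList)

-- ===== PORT B =====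
-- Source B's state machine: 0 token start, 1 in key, 2 armed (key + trailing '='), 3 dead
def containsGoB (st : Nat) : List Char → Bool
  | [] => st == 2
  | c :: rest =>
    if PySem.Chars.isspace c then
      if st == 2 then true else containsGoB 0 rest
    else if c = '=' then
      containsGoB (if st == 1 then 2 else 3) rest
    else
      containsGoB (if st ≤ 1 then 1 else 3) rest

def contains_empty_query_assignment_py_alt (query_string : String) : Bool :=
  containsGoB 0 query_string.toList

-- ===== PRECONDITION & SPEC =====
def Spec_contains_empty_query_assignment_py (query_string : String) (out : Bool) : Prop := out = contains_empty_query_assignment_py_alt query_string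
instance (query_string : String) (out : Bool) : Decidable (Spec_contains_empty_query_assignment_py query_string out) := by unfold Spec_contains_empty_query_assignment_py; infer_instance

-- ===== CLAIM (what is proved, stated in full; the proofs are below) =====
def Claim_equal_contains_empty_query_assignment_py : Prop := ∀ (query_string : String), Dom_contains_empty_query_assignment_py query_string → Spec_contains_empty_query_assignment_py query_string (contains_empty_query_assignment_py query_string)

-- ===== LEMMAS AND PROOFS =====

-- "token t is an empty assignment": what one iteration of A's loop tests
def badTok (t : List Char) : Bool :=
  let p := pyPartitionEq [] t
  !(p.2.1.isEmpty || p.1.isEmpty) && p.2.2.isEmpty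

theorem containsGoA_eq_any (ts : List (List Char)) : containsGoA ts = ts.any badTok := by
  induction ts with
  | nil => rfl
  | cons t ts ih =>
    simp only [containsGoA, List.any_cons, badTok]
    by_cases h1 : ((pyPartitionEq [] t).2.1.isEmpty || (pyPartitionEq [] t).1.isEmpty) = true
    · simp [h1, ih]
    · by_cases h2 : (pyPartitionEq [] t).2.2.isEmpty = true
      · simp [h1, h2]
      · simp [h1, h2, ih]

theorem pyPartitionEq_no_eq (t : List Char) (h : '=' ∉ t) :
    ∀ acc, pyPartitionEq acc t = (acc.reverse ++ t, [], []) := by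
  induction t with
  | nil => intro acc; simp [pyPartitionEq]
  | cons c rest ih =>
    intro acc
    have hc : c ≠ '=' := fun hh => h (hh ▸ List.mem_cons_self)
    have hr : '=' ∉ rest := fun hh => h (List.mem_cons_of_mem _ hh)
    simp [pyPartitionEq, hc, ih hr]

theorem pyPartitionEq_first_eq (t : List Char) (h : '=' ∉ t) (r : List Char) :
    ∀ acc, pyPartitionEq acc (t ++ '=' :: r) = (acc.reverse ++ t, ['='], r) := by
  induction t with
  | nil => intro acc; simp [pyPartitionEq]
  | cons c rest ih =>
    intro acc
    have hc : c ≠ '=' := fun hh => h (hh ▸ List.mem_cons_self)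
    have hr : '=' ∉ rest := fun hh => h (List.mem_cons_of_mem _ hh)
    simp [pyPartitionEq, hc, ih hr]

theorem badTok_no_eq (t : List Char) (h : '=' ∉ t) : badTok t = false := by
  simp [badTok, pyPartitionEq_no_eq t h]

theorem badTok_armed (k : List Char) (hk : k ≠ []) (h : '=' ∉ k) : badTok (k ++ ['=']) = true := by
  simp [badTok, pyPartitionEq_first_eq k h [], hk]

-- first-occurrence decomposition
theorem exists_first_split {α : Type} [DecidableEq α] (a : α) (t : List α) (h : a ∈ t) :
    ∃ p s, t = p ++ a :: s ∧ a ∉ p := by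
  induction t with
  | nil => cases h
  | cons c rest ih =>
    by_cases hc : c = a
    · exact ⟨[], rest, by simp [hc], by simp⟩
    · have h' : a ∈ rest := by
        rcases List.mem_cons.mp h with h' | h'
        · exact absurd h'.symm hc
        · exact h'
      rcases ih h' with ⟨p, s, hps, hnp⟩
      refine ⟨c :: p, s, by simp [hps], ?_⟩
      intro hh
      rcases List.mem_cons.mp hh with hh' | hh'
      · exact hc hh'.symm
      · exact hnp hh'

theorem badTok_extend (t : List Char) (h : '=' ∈ t) (r : List Char) (hr : r ≠ []) :
    badTok (t ++ r) = false := by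
  rcases exists_first_split '=' t h with ⟨p, s, hps, hnp⟩
  subst hps
  have : (p ++ '=' :: s) ++ r = p ++ '=' :: (s ++ r) := by simp
  rw [this]
  simp [badTok, pyPartitionEq_first_eq p hnp (s ++ r), hr]

-- split₀.go with a nonempty accumulator just prepends the finished tokens
theorem split₀_go_acc (cs : List Char) :
    ∀ cur acc, PySem.Chars.split₀.go cs cur acc = acc.reverse ++ PySem.Chars.split₀.go cs cur [] := by
  induction cs with
  | nil => intro cur acc; simp [PySem.Chars.split₀.go]; split_ifs <;> simp
  | cons c rest ih =>
    intro cur acc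
    simp only [PySem.Chars.split₀.go]
    split_ifs with h1 h2
    · exact ih [] acc
    · rw [ih [] (cur.reverse :: acc), ih [] [cur.reverse]]; simp
    · exact ih (c :: cur) acc

-- the state-machine invariant: what `st` says about the current partial token `cur` (reversed)
def Rst (st : Nat) (cur : List Char) : Prop :=
  (st = 0 ∧ cur = []) ∨
  (st = 1 ∧ cur ≠ [] ∧ '=' ∉ cur) ∨
  (st = 2 ∧ ∃ k, cur = '=' :: k ∧ k ≠ [] ∧ '=' ∉ k) ∨
  (st = 3 ∧ '=' ∈ cur ∧ badTok cur.reverse = false)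

theorem goB_eq_goA (cs : List Char) :
    ∀ st cur, Rst st cur →
      containsGoB st cs = (PySem.Chars.split₀.go cs cur []).any badTok := by
  induction cs with
  | nil =>
    intro st cur hR
    rcases hR with ⟨h0, hc⟩ | ⟨h1, hne, hni⟩ | ⟨h2, k, hk, hkne, hkni⟩ | ⟨h3, hmem, hbad⟩
    · subst h0 hc; simp [containsGoB, PySem.Chars.split₀.go]
    · subst h1
      have : badTok cur.reverse = false :=
        badTok_no_eq _ (by simpa using hni)
      simp [containsGoB, PySem.Chars.split₀.go, hne, this]
    · subst h2 hk
      have harm : badTok (k.reverse ++ ['=']) = true :=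
        badTok_armed k.reverse (by simpa using hkne) (by simpa using hkni)
      simp [containsGoB, PySem.Chars.split₀.go, harm]
    · subst h3
      have hne : cur ≠ [] := fun hh => by simp [hh] at hmem
      simp [containsGoB, PySem.Chars.split₀.go, hne, hbad]
  | cons c rest ih =>
    intro st cur hR
    simp only [containsGoB, PySem.Chars.split₀.go]
    by_cases hsp : PySem.Chars.isspace c = true
    · rw [if_pos hsp, if_pos hsp]
      rcases hR with ⟨h0, hc⟩ | ⟨h1, hne, hni⟩ | ⟨h2, k, hk, hkne, hkni⟩ | ⟨h3, hmem, hbad⟩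
      · subst h0 hc
        simp [ih 0 [] (Or.inl ⟨rfl, rfl⟩)]
      · subst h1
        have hb : badTok cur.reverse = false := badTok_no_eq _ (by simpa using hni)
        simp [hne, split₀_go_acc rest [] [cur.reverse], hb, ih 0 [] (Or.inl ⟨rfl, rfl⟩)]
      · subst h2 hk
        have harm : badTok (k.reverse ++ ['=']) = true :=
          badTok_armed k.reverse (by simpa using hkne) (by simpa using hkni)
        simp [split₀_go_acc rest [] [k.reverse ++ ['=']], harm]
      · subst h3
        have hne : cur ≠ [] := fun hh => by simp [hh] at hmem
        have h3ne : ((3 : Nat) == 2) = false := rfl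
        simp [hne, h3ne, split₀_go_acc rest [] [cur.reverse], hbad, ih 0 [] (Or.inl ⟨rfl, rfl⟩)]
    · rw [if_neg hsp, if_neg hsp]
      by_cases heq : c = '='
      · subst heq
        rw [if_pos rfl]
        rcases hR with ⟨h0, hc⟩ | ⟨h1, hne, hni⟩ | ⟨h2, k, hk, hkne, hkni⟩ | ⟨h3, hmem, hbad⟩
        · subst h0 hc
          refine ih 3 ['='] (Or.inr (Or.inr (Or.inr ⟨rfl, by simp, by decide⟩)))
        · subst h1
          exact ih 2 ('=' :: cur) (Or.inr (Or.inr (Or.inl ⟨rfl, cur, rfl, hne, hni⟩)))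
        · subst h2 hk
          refine ih 3 ('=' :: '=' :: k) (Or.inr (Or.inr (Or.inr ⟨rfl, by simp, ?_⟩)))
          simpa using badTok_extend (('=' :: k).reverse) (by simp) ['='] (by simp)
        · subst h3
          refine ih 3 ('=' :: cur) (Or.inr (Or.inr (Or.inr ⟨rfl, by simp, ?_⟩)))
          simpa using badTok_extend cur.reverse (by simpa using hmem) ['='] (by simp)
      · rw [if_neg heq]
        rcases hR with ⟨h0, hc⟩ | ⟨h1, hne, hni⟩ | ⟨h2, k, hk, hkne, hkni⟩ | ⟨h3, hmem, hbad⟩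
        · subst h0 hc
          refine ih 1 [c] (Or.inr (Or.inl ⟨rfl, by simp, ?_⟩))
          intro hh
          rcases List.mem_cons.mp hh with hh' | hh'
          · exact heq hh'.symm
          · cases hh'
        · subst h1
          refine ih 1 (c :: cur) (Or.inr (Or.inl ⟨rfl, by simp, ?_⟩))
          intro hh
          rcases List.mem_cons.mp hh with hh' | hh'
          · exact heq hh'.symm
          · exact hni hh'
        · subst h2 hk
          refine ih 3 (c :: '=' :: k) (Or.inr (Or.inr (Or.inr ⟨rfl, by simp, ?_⟩)))
          simpa using badTok_extend (('=' :: k).reverse) (by simp) [c] (by simp)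
        · subst h3
          refine ih 3 (c :: cur) (Or.inr (Or.inr (Or.inr ⟨rfl, List.mem_cons_of_mem _ hmem, ?_⟩)))
          simpa using badTok_extend cur.reverse (by simpa using hmem) [c] (by simp)

-- ===== VERDICT (by name: the statement is the Claim_ definition above) =====
theorem contains_empty_query_assignment_py_spec : Claim_equal_contains_empty_query_assignment_py := by
  intro q _hdom
  unfold Spec_contains_empty_query_assignment_py
  unfold contains_empty_query_assignment_py contains_empty_query_assignment_py_alt
  rw [containsGoA_eq_any, PySem.Chars.split₀,
    goB_eq_goA q.toList 0 [] (Or.inl ⟨rfl, rfl⟩)]
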